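-- pv_equiv track=rewrite | github.com/Harryhaha/Rel_Extraction-UNSW_InfoRetrieval_and_Search | my_extractor.py | group_every_pair_of_NE_in_order
-- ===== SOURCE A (Python) =====
-- from collections import defaultdict
--
-- def group_every_pair_of_NE_in_order( NE_annotations ):
--     rel_dict_collection_dict = defaultdict(dict)
--     index = 0
--     for i in range(len(NE_annotations) - 1):
--         if NE_annotations[i][2] == 'O': continue
--
--         rel_dict_group = []
--         for j in range(i + 1, len(NE_annotations)):
--             if NE_annotations[j][2] == 'O': continue
--
--             rel_dict = defaultdict(str)
--
--             rel_dict['subject_left_text'] = " ".join([x[3] for x in NE_annotations[0:i]])  # Could be empty string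
--             rel_dict['subject_left_term'] = (
--             " ".join([x[3] for x in NE_annotations[0:i]])).lower()  # Could be empty string
--
--             rel_dict['subject_text'] = NE_annotations[i][3]
--             rel_dict['subject_term'] = NE_annotations[i][3].lower()
--             rel_dict['subject_class'] = NE_annotations[i][2]
--
--             rel_dict['filler_text'] = " ".join([x[3] for x in NE_annotations[i + 1:j]])
--             rel_dict['filler_term'] = " ".join([x[3] for x in NE_annotations[i + 1:j]]).lower()
--
--             rel_dict['object_text'] = NE_annotations[j][3]
--             rel_dict['object_term'] = NE_annotations[j][3].lower()
--             rel_dict['object_class'] = NE_annotations[j][2]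
--
--             rel_dict['object_right_text'] = " ".join([x[3] for x in NE_annotations[j + 1:]])
--             rel_dict['object_right_term'] = (" ".join([x[3] for x in NE_annotations[j + 1:]])).lower()
--
--             rel_dict_group.append(rel_dict)
--
--         rel_dict_collection_dict[index] = rel_dict_group
--         index += 1
--     return rel_dict_collection_dict
-- ===== SOURCE B (Python) =====
-- from collections import defaultdict
--
--
-- def group_every_pair_of_NE_in_order(NE_annotations):
--     # Different decomposition: precompute the word list and all prefix/suffix joins
--     # once (incrementally), and maintain the filler join as a running accumulator,
--     # so no slice is ever re-joined inside the quadratic pair loop.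
--     words = [x[3] for x in NE_annotations]
--     classes = [x[2] for x in NE_annotations]
--     n = len(words)
--     prefixes = [""]  # prefixes[k] == " ".join(words[:k])
--     for k in range(n):
--         prefixes.append(words[k] if k == 0 else prefixes[-1] + " " + words[k])
--     rev = [""]  # built back-to-front; suffixes[k] == " ".join(words[k:])
--     for k in range(n - 1, -1, -1):
--         rev.append(words[k] if k == n - 1 else words[k] + " " + rev[-1])
--     suffixes = rev[::-1]
--     result = defaultdict(dict)
--     index = 0
--     for i in range(n - 1):
--         if classes[i] == 'O':
--             continue
--         left = prefixes[i]
--         group = []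
--         filler = ""  # == " ".join(words[i + 1:j]) at the top of each iteration
--         for j in range(i + 1, n):
--             if classes[j] != 'O':
--                 right = suffixes[j + 1]
--                 group.append(defaultdict(str, {
--                     'subject_left_text': left,
--                     'subject_left_term': left.lower(),
--                     'subject_text': words[i],
--                     'subject_term': words[i].lower(),
--                     'subject_class': classes[i],
--                     'filler_text': filler,
--                     'filler_term': filler.lower(),
--                     'object_text': words[j],
--                     'object_term': words[j].lower(),
--                     'object_class': classes[j],
--                     'object_right_text': right,
--                     'object_right_term': right.lower(),
--                 }))
--             filler = words[j] if j == i + 1 else filler + " " + words[j]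
--         result[index] = group
--         index += 1
--     return result
-- ===== Notes on version B (the rewrite author's own statement) =====
-- stated objective: alternative
-- what changed: Instead of re-joining four list slices for every (i,j) pair, B precomputes all prefix and suffix joins once (each built incrementally), keeps the filler join as a running accumulator in the inner loop, and builds each group dict as a literal instead of keyed defaultdict assignments.
import Mathlib
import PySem

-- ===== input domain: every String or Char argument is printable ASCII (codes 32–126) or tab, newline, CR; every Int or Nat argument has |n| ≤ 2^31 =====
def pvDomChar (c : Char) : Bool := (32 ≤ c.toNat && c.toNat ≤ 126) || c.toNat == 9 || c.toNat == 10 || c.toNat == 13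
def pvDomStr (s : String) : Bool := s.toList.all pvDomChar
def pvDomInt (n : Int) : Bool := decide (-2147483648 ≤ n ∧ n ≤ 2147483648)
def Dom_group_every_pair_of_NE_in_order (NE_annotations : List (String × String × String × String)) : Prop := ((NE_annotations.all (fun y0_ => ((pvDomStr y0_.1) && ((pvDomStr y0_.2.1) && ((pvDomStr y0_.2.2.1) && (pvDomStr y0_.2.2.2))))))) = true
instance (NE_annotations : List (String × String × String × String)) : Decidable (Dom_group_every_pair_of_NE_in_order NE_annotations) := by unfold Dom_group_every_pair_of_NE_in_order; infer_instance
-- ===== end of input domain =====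

-- B precomputes all prefix/suffix joins once and keeps the filler join as a running
-- accumulator, instead of A's re-joining of four slices for every (i, j) pair.

-- ===== PORT A =====
def pvDflt4 : String × String × String × String := ("", "", "", "")

-- the rel_dict built for one pair (i, j): a defaultdict(str) assigned 12 distinct keys in order
def pvRelDictA (NE : List (String × String × String × String)) (i j : Int) : PySem.Dict String String :=
  ((((((((((((PySem.Dict.empty.insert "subject_left_text"
      (PySem.Str.join " " ((PySem.List.slice NE (some 0) (some i)).map (fun x => x.2.2.2)))).insert
    "subject_left_term"
      (PySem.Str.lower (PySem.Str.join " " ((PySem.List.slice NE (some 0) (some i)).map (fun x => x.2.2.2))))).insert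
    "subject_text" (PySem.List.pyGetD NE i pvDflt4).2.2.2).insert
    "subject_term" (PySem.Str.lower (PySem.List.pyGetD NE i pvDflt4).2.2.2)).insert
    "subject_class" (PySem.List.pyGetD NE i pvDflt4).2.2.1).insert
    "filler_text" (PySem.Str.join " " ((PySem.List.slice NE (some (i + 1)) (some j)).map (fun x => x.2.2.2)))).insert
    "filler_term" (PySem.Str.lower (PySem.Str.join " " ((PySem.List.slice NE (some (i + 1)) (some j)).map (fun x => x.2.2.2))))).insert
    "object_text" (PySem.List.pyGetD NE j pvDflt4).2.2.2).insert
    "object_term" (PySem.Str.lower (PySem.List.pyGetD NE j pvDflt4).2.2.2)).insert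
    "object_class" (PySem.List.pyGetD NE j pvDflt4).2.2.1).insert
    "object_right_text" (PySem.Str.join " " ((PySem.List.slice NE (some (j + 1)) none).map (fun x => x.2.2.2)))).insert
    "object_right_term" (PySem.Str.lower (PySem.Str.join " " ((PySem.List.slice NE (some (j + 1)) none).map (fun x => x.2.2.2)))))

def group_every_pair_of_NE_in_order (NE_annotations : List (String × String × String × String)) : List (Int × List (List (String × String))) :=
  ((PySem.List.pyRange 0 (PySem.List.len NE_annotations - 1) 1).foldl
    (fun (st : PySem.Dict Int (List (List (String × String))) × Int) i =>
      if (PySem.List.pyGetD NE_annotations i pvDflt4).2.2.1 == "O" then st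
      else
        let group := (PySem.List.pyRange (i + 1) (PySem.List.len NE_annotations) 1).foldl
          (fun (g : List (List (String × String))) j =>
            if (PySem.List.pyGetD NE_annotations j pvDflt4).2.2.1 == "O" then g
            else g ++ [(pvRelDictA NE_annotations i j).items])
          []
        (st.1.insert st.2 group, st.2 + 1))
    (PySem.Dict.empty, 0)).1.items

-- ===== PORT B =====
-- the dict literal Source B appends: 12 distinct keys, so its items are exactly this pair list
def pvRelDictB (left filler stext scls otext ocls right : String) : List (String × String) :=
  [("subject_left_text", left), ("subject_left_term", PySem.Str.lower left),
   ("subject_text", stext), ("subject_term", PySem.Str.lower stext), ("subject_class", scls),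
   ("filler_text", filler), ("filler_term", PySem.Str.lower filler),
   ("object_text", otext), ("object_term", PySem.Str.lower otext), ("object_class", ocls),
   ("object_right_text", right), ("object_right_term", PySem.Str.lower right)]

def group_every_pair_of_NE_in_order_alt (NE_annotations : List (String × String × String × String)) : List (Int × List (List (String × String))) :=
  let words := NE_annotations.map (fun x => x.2.2.2)
  let classes := NE_annotations.map (fun x => x.2.2.1)
  let n := PySem.List.len words
  let prefixes := (PySem.List.pyRange 0 n 1).foldl
    (fun (p : List String) k =>
      p ++ [if k == 0 then PySem.List.pyGetD words k ""
            else PySem.List.pyGetD p (-1) "" ++ " " ++ PySem.List.pyGetD words k ""]) [""]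
  let rev := (PySem.List.pyRange (n - 1) (-1) (-1)).foldl
    (fun (r : List String) k =>
      r ++ [if k == n - 1 then PySem.List.pyGetD words k ""
            else PySem.List.pyGetD words k "" ++ " " ++ PySem.List.pyGetD r (-1) ""]) [""]
  let suffixes := (PySem.List.slice? rev none none (-1)).getD []  -- rev[::-1]; step -1 never fails
  ((PySem.List.pyRange 0 (n - 1) 1).foldl
    (fun (st : PySem.Dict Int (List (List (String × String))) × Int) i =>
      if (PySem.List.pyGetD classes i "") == "O" then st
      else
        let left := PySem.List.pyGetD prefixes i ""
        let inner := (PySem.List.pyRange (i + 1) n 1).foldl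
          (fun (gf : List (List (String × String)) × String) j =>
            let g := if (PySem.List.pyGetD classes j "") != "O" then
                gf.1 ++ [pvRelDictB left gf.2
                          (PySem.List.pyGetD words i "") (PySem.List.pyGetD classes i "")
                          (PySem.List.pyGetD words j "") (PySem.List.pyGetD classes j "")
                          (PySem.List.pyGetD suffixes (j + 1) "")]
              else gf.1
            let filler := if j == i + 1 then PySem.List.pyGetD words j ""
              else gf.2 ++ " " ++ PySem.List.pyGetD words j ""
            (g, filler))
          ([], "")
        (st.1.insert st.2 inner.1, st.2 + 1))
    (PySem.Dict.empty, 0)).1.items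

-- ===== PRECONDITION & SPEC =====
def Spec_group_every_pair_of_NE_in_order (NE_annotations : List (String × String × String × String)) (out : List (Int × List (List (String × String)))) : Prop := out = group_every_pair_of_NE_in_order_alt NE_annotations
instance (NE_annotations : List (String × String × String × String)) (out : List (Int × List (List (String × String)))) : Decidable (Spec_group_every_pair_of_NE_in_order NE_annotations out) := by unfold Spec_group_every_pair_of_NE_in_order; infer_instance

-- ===== CLAIM (what is proved, stated in full; the proofs are below) =====
def Claim_equal_group_every_pair_of_NE_in_order : Prop := ∀ (NE_annotations : List (String × String × String × String)), Dom_group_every_pair_of_NE_in_order NE_annotations → Spec_group_every_pair_of_NE_in_order NE_annotations (group_every_pair_of_NE_in_order NE_annotations)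

-- ===== LEMMAS AND PROOFS =====

def J (l : List String) : String := PySem.Str.join " " l

theorem J_nil : J [] = "" := by
  apply String.toList_inj.mp
  simp [J, PySem.Str.toList_join, PySem.Chars.join_nil]

theorem J_cons (w : String) (ws : List String) :
    J (w :: ws) = if ws = [] then w else w ++ " " ++ J ws := by
  cases ws with
  | nil =>
    apply String.toList_inj.mp
    simp [J, PySem.Str.toList_join, PySem.Chars.join_singleton]
  | cons b t =>
    apply String.toList_inj.mp
    simp [J, PySem.Str.toList_join, PySem.Chars.join_cons_cons]

theorem J_append (ws : List String) (w : String) :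
    J (ws ++ [w]) = if ws = [] then w else J ws ++ " " ++ w := by
  induction ws with
  | nil => rw [List.nil_append, J_cons]; simp
  | cons a t ih =>
    rw [List.cons_append, J_cons]
    cases t with
    | nil => rw [List.nil_append, J_cons]; simp [J_cons]
    | cons b t' =>
      simp only [List.cons_append, reduceCtorEq, if_false] at ih ⊢
      rw [ih]
      conv_rhs => rw [J_cons, if_neg (List.cons_ne_nil b t')]
      apply String.toList_inj.mp
      simp [List.append_assoc]

theorem pvRelDictA_items (NE : List (String × String × String × String)) (i j : Int) :
    (pvRelDictA NE i j).items =
      pvRelDictB (PySem.Str.join " " ((PySem.List.slice NE (some 0) (some i)).map (fun x => x.2.2.2)))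
        (PySem.Str.join " " ((PySem.List.slice NE (some (i + 1)) (some j)).map (fun x => x.2.2.2)))
        (PySem.List.pyGetD NE i pvDflt4).2.2.2 (PySem.List.pyGetD NE i pvDflt4).2.2.1
        (PySem.List.pyGetD NE j pvDflt4).2.2.2 (PySem.List.pyGetD NE j pvDflt4).2.2.1
        (PySem.Str.join " " ((PySem.List.slice NE (some (j + 1)) none).map (fun x => x.2.2.2))) := by
  simp [pvRelDictA, pvRelDictB, PySem.Dict.items_insert, PySem.Dict.contains_insert, PySem.Dict.empty]

theorem prefix_aux (ws : List String) (m : Nat) (hm : m ≤ ws.length) :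
    (PySem.List.pyRange 0 (m : Int) 1).foldl
      (fun (p : List String) k =>
        p ++ [if k == 0 then PySem.List.pyGetD ws k ""
              else PySem.List.pyGetD p (-1) "" ++ " " ++ PySem.List.pyGetD ws k ""]) [""]
    = (List.range (m + 1)).map (fun k => J (ws.take k)) := by
  induction m with
  | zero =>
    rw [PySem.List.pyRange_one_eq_nil (by simp)]
    simp [J_nil]
  | succ m ih =>
    have hmn : m < ws.length := by omega
    rw [show ((m+1:Nat):Int) = (m:Int) + 1 by push_cast; ring,
        PySem.List.pyRange_one_succ_right (by positivity), List.foldl_append, ih (by omega)]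
    simp only [List.foldl_cons, List.foldl_nil]
    conv_rhs => rw [List.range_succ, List.map_append]
    congr 1
    simp only [List.map_cons, List.map_nil]
    have hw : PySem.List.pyGetD ws (m : Int) "" = ws[m] := by
      rw [PySem.List.pyGetD_eq_getElem ws "" (by positivity) (by exact_mod_cast hmn)]
      simp
    have hg : J (ws.take (m + 1)) = if m = 0 ∨ ws = [] then ws[m] else J (ws.take m) ++ " " ++ ws[m] := by
      rw [List.take_add_one, List.getElem?_eq_getElem hmn, Option.toList_some, J_append]
      simp only [List.take_eq_nil_iff]
    by_cases hm0 : m = 0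
    · subst hm0
      simp only [Nat.cast_zero] at hw ⊢
      simp [hw, hg]
    · have hc : ((m : Int) == 0) = false := by simp [hm0]
      rw [hc]
      simp only [Bool.false_eq_true, if_false]
      conv_lhs => rw [List.range_succ, List.map_append]
      rw [List.map_cons, List.map_nil, PySem.List.pyGetD_neg_one_append_singleton, hw]
      rw [hg, if_neg (by push Not; exact ⟨hm0, by intro h; simp [h] at hmn⟩)]

theorem rev_aux (ws : List String) (k : Nat) (hk : k ≤ ws.length) :
    (PySem.List.pyRange ((k : Int) - 1) (-1) (-1)).foldl
      (fun (r : List String) j =>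
        r ++ [if j == PySem.List.len ws - 1 then PySem.List.pyGetD ws j ""
              else PySem.List.pyGetD ws j "" ++ " " ++ PySem.List.pyGetD r (-1) ""])
      ((List.range (ws.length - k + 1)).map (fun t => J (ws.drop (ws.length - t))))
    = (List.range (ws.length + 1)).map (fun t => J (ws.drop (ws.length - t))) := by
  induction k with
  | zero =>
    rw [show ((0:Nat):Int) - 1 = -1 by norm_num, PySem.List.pyRange_neg_one_eq_nil (by omega)]
    simp
  | succ k ih =>
    have hkn : k < ws.length := by omega
    rw [show ((k+1:Nat):Int) - 1 = (k:Int) by push_cast; ring,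
        PySem.List.pyRange_neg_one_cons (by omega), List.foldl_cons]
    have hw : PySem.List.pyGetD ws (k : Int) "" = ws[k] := by
      rw [PySem.List.pyGetD_eq_getElem ws "" (by positivity) (by exact_mod_cast hkn)]
      simp
    have hstep :
        ((List.range (ws.length - (k+1) + 1)).map (fun t => J (ws.drop (ws.length - t)))) ++
          [if ((k:Int) == PySem.List.len ws - 1) then PySem.List.pyGetD ws (k:Int) ""
           else PySem.List.pyGetD ws (k:Int) "" ++ " " ++
             PySem.List.pyGetD ((List.range (ws.length - (k+1) + 1)).map (fun t => J (ws.drop (ws.length - t)))) (-1) ""]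
        = (List.range (ws.length - k + 1)).map (fun t => J (ws.drop (ws.length - t))) := by
      have hrange : ws.length - k + 1 = (ws.length - (k+1) + 1) + 1 := by omega
      conv_rhs => rw [hrange, List.range_succ, List.map_append]
      congr 1
      simp only [List.map_cons, List.map_nil]
      have hdk : ws.drop k = ws[k] :: ws.drop (k + 1) := List.drop_eq_getElem_cons hkn
      have htgt : J (ws.drop (ws.length - (ws.length - (k+1) + 1))) = J (ws.drop k) := by
        congr 2
        omega
      rw [htgt, hdk, J_cons]
      have hlast : PySem.List.pyGetD
          ((List.range (ws.length - (k+1) + 1)).map (fun t => J (ws.drop (ws.length - t)))) (-1) ""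
          = J (ws.drop (k + 1)) := by
        conv_lhs => rw [List.range_succ, List.map_append]
        rw [List.map_cons, List.map_nil, PySem.List.pyGetD_neg_one_append_singleton]
        congr 2
        omega
      by_cases hk1 : k = ws.length - 1
      · have hc : ((k:Int) == PySem.List.len ws - 1) = true := by
          simp only [beq_iff_eq, PySem.List.len_eq]
          omega
        have hnil : ws.drop (k + 1) = [] := by
          rw [List.drop_eq_nil_iff]
          omega
        rw [hc, hnil]
        simp [hw]
      · have hc : ((k:Int) == PySem.List.len ws - 1) = false := by
          simp only [beq_eq_false_iff_ne, ne_eq, PySem.List.len_eq]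
          omega
        have hne : ws.drop (k + 1) ≠ [] := by
          rw [ne_eq, List.drop_eq_nil_iff]
          omega
        rw [hc, if_neg hne]
        simp [hw, hlast]
    rw [hstep, ih (by omega)]

theorem getD_map_range_int {β : Type} (h : Nat → β) (m : Nat) (q : Int) (d : β)
    (h0 : 0 ≤ q) (h1 : q < (m : Int)) :
    PySem.List.pyGetD ((List.range m).map h) q d = h q.toNat := by
  rw [PySem.List.pyGetD_eq_getElem _ d h0 (by simp; omega)]
  rw [List.getElem_map, List.getElem_range]

theorem suffix_get (ws : List String) (q : Int) (h0 : 0 ≤ q) (h1 : q ≤ (ws.length : Int)) :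
    PySem.List.pyGetD (((List.range (ws.length + 1)).map (fun t => J (ws.drop (ws.length - t)))).reverse) q ""
      = J (ws.drop q.toNat) := by
  rw [PySem.List.pyGetD_eq_getElem _ "" h0 (by simp; omega)]
  rw [List.getElem_reverse]
  simp only [List.length_map, List.length_range]
  rw [List.getElem_map, List.getElem_range]
  congr 2
  omega

theorem inner_general {β : Type} (condA condB : Int → Bool) (dA : Int → β)
    (dB : String → Int → β) (wrd : Int → String) (fil : Int → String) (i n : Int)
    (hcond : ∀ j, i + 1 ≤ j → j < n → condA j = condB j)
    (hd : ∀ j, i + 1 ≤ j → j < n → condB j = false → dB (fil j) j = dA j)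
    (hf : ∀ j, i + 1 ≤ j → j < n →
      (if j == i + 1 then wrd j else fil j ++ " " ++ wrd j) = fil (j + 1)) :
    ∀ (m : Nat) (t : Int), (n - t).toNat = m → i + 1 ≤ t →
      ∀ (g : List β) (s : String), s = fil t →
      (PySem.List.pyRange t n 1).foldl (fun g j => if condA j then g else g ++ [dA j]) g
      = ((PySem.List.pyRange t n 1).foldl
          (fun gf j =>
            (if !condB j then gf.1 ++ [dB gf.2 j] else gf.1,
             if j == i + 1 then wrd j else gf.2 ++ " " ++ wrd j)) (g, s)).1 := by
  intro m
  induction m with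
  | zero =>
    intro t ht hti g s hs
    rw [PySem.List.pyRange_one_eq_nil (by omega)]
    simp
  | succ m ih =>
    intro t ht hti g s hs
    have htn : t < n := by omega
    rw [PySem.List.pyRange_one_cons htn]
    simp only [List.foldl_cons]
    have hstep2 : (if (t == i + 1) then wrd t else s ++ " " ++ wrd t) = fil (t + 1) := by
      rw [hs]
      exact hf t hti htn
    cases hcb : condB t with
    | false =>
      rw [hcond t hti htn, hcb]
      simp only [Bool.false_eq_true, if_false, Bool.not_false, if_true]
      rw [hs, hd t hti htn hcb, ← hs]
      exact ih (t + 1) (by omega) (by omega) (g ++ [dA t]) _ (by rw [← hstep2])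
    | true =>
      rw [hcond t hti htn, hcb]
      simp only [if_true, Bool.not_true, Bool.false_eq_true, if_false]
      exact ih (t + 1) (by omega) (by omega) g _ (by rw [← hstep2])

theorem prefix_fold (ws : List String) :
    (PySem.List.pyRange 0 (PySem.List.len ws) 1).foldl
      (fun (p : List String) k =>
        p ++ [if k == 0 then PySem.List.pyGetD ws k ""
              else PySem.List.pyGetD p (-1) "" ++ " " ++ PySem.List.pyGetD ws k ""]) [""]
    = (List.range (ws.length + 1)).map (fun k => J (ws.take k)) := by
  rw [PySem.List.len_eq]
  exact prefix_aux ws ws.length le_rfl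

theorem rev_fold (ws : List String) :
    (PySem.List.pyRange (PySem.List.len ws - 1) (-1) (-1)).foldl
      (fun (r : List String) j =>
        r ++ [if j == PySem.List.len ws - 1 then PySem.List.pyGetD ws j ""
              else PySem.List.pyGetD ws j "" ++ " " ++ PySem.List.pyGetD r (-1) ""]) [""]
    = (List.range (ws.length + 1)).map (fun t => J (ws.drop (ws.length - t))) := by
  rw [PySem.List.len_eq]
  rw [show ([""] : List String)
      = (List.range (ws.length - ws.length + 1)).map (fun t => J (ws.drop (ws.length - t))) by
    simp [J_nil, List.drop_eq_nil_of_le]]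
  exact rev_aux ws ws.length le_rfl

theorem ports_eq (NE : List (String × String × String × String)) :
    group_every_pair_of_NE_in_order NE = group_every_pair_of_NE_in_order_alt NE := by
  unfold group_every_pair_of_NE_in_order group_every_pair_of_NE_in_order_alt
  dsimp only
  rw [prefix_fold (NE.map (fun x => x.2.2.2)), rev_fold (NE.map (fun x => x.2.2.2))]
  rw [PySem.List.slice?_none_none_neg_one]
  simp only [Option.getD_some, PySem.List.len_eq, List.length_map]
  refine congrArg (fun st : PySem.Dict Int (List (List (String × String))) × Int => st.1.items) ?_
  apply PySem.List.foldl_congr_mem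
  intro acc i hi
  rw [PySem.List.mem_pyRange_one] at hi
  obtain ⟨hi0, hi1⟩ := hi
  have hclassEq : ∀ q : Int, PySem.List.pyGetD (List.map (fun x : String × String × String × String => x.2.2.1) NE) q ""
      = (PySem.List.pyGetD NE q pvDflt4).2.2.1 :=
    fun q => PySem.List.pyGetD_map (fun x => x.2.2.1) NE q pvDflt4
  simp only [hclassEq]
  cases hO : ((PySem.List.pyGetD NE i pvDflt4).2.2.1 == "O") with
  | true => simp only [if_true]
  | false =>
    simp only [Bool.false_eq_true, if_false]
    refine congrArg (fun g => (acc.1.insert acc.2 g, acc.2 + 1)) ?_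
    refine inner_general
      (fun j => ((PySem.List.pyGetD NE j pvDflt4).2.2.1 == "O"))
      (fun j => ((PySem.List.pyGetD NE j pvDflt4).2.2.1 == "O"))
      (fun j => (pvRelDictA NE i j).items)
      (fun s j => pvRelDictB
          (PySem.List.pyGetD ((List.range (NE.length + 1)).map (fun k => J ((NE.map (fun x => x.2.2.2)).take k))) i "")
          s
          (PySem.List.pyGetD (NE.map (fun x => x.2.2.2)) i "")
          ((PySem.List.pyGetD NE i pvDflt4).2.2.1)
          (PySem.List.pyGetD (NE.map (fun x => x.2.2.2)) j "")
          ((PySem.List.pyGetD NE j pvDflt4).2.2.1)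
          (PySem.List.pyGetD (((List.range (NE.length + 1)).map (fun t => J ((NE.map (fun x => x.2.2.2)).drop (NE.length - t)))).reverse) (j + 1) ""))
      (fun j => PySem.List.pyGetD (NE.map (fun x => x.2.2.2)) j "")
      (fun t => J (((NE.map (fun x => x.2.2.2)).drop (i.toNat + 1)).take ((t - (i + 1)).toNat)))
      i (↑NE.length)
      (fun _ _ _ => rfl)
      ?hd ?hf ((↑NE.length - (i + 1)).toNat) (i + 1) rfl le_rfl [] "" ?hs
    case hs =>
      beta_reduce
      rw [show ((i + 1) - (i + 1) : Int).toNat = 0 by omega, List.take_zero]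
      exact J_nil.symm
    case hd =>
      intro j hj1 hj2 hcf
      beta_reduce
      rw [pvRelDictA_items]
      have hleft : PySem.List.pyGetD ((List.range (NE.length + 1)).map (fun k => J ((NE.map (fun x => x.2.2.2)).take k))) i ""
          = J ((NE.map (fun x => x.2.2.2)).take i.toNat) :=
        getD_map_range_int _ _ i "" hi0 (by push_cast; omega)
      have hsuffj : PySem.List.pyGetD (((List.range (NE.length + 1)).map (fun t => J ((NE.map (fun x => x.2.2.2)).drop (NE.length - t)))).reverse) (j + 1) ""
          = J ((NE.map (fun x => x.2.2.2)).drop (j + 1).toNat) := by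
        have h := suffix_get (NE.map (fun x => x.2.2.2)) (j + 1) (by omega) (by simp; omega)
        simpa using h
      have hsl : PySem.Str.join " " ((PySem.List.slice NE (some 0) (some i)).map (fun x => x.2.2.2))
          = J ((NE.map (fun x => x.2.2.2)).take i.toNat) := by
        rw [PySem.List.slice_zero_start, PySem.List.slice_to NE hi0]
        simp [J, List.map_take]
      have hfil : PySem.Str.join " " ((PySem.List.slice NE (some (i + 1)) (some j)).map (fun x => x.2.2.2))
          = J (((NE.map (fun x => x.2.2.2)).drop (i.toNat + 1)).take ((j - (i + 1)).toNat)) := by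
        rw [PySem.List.slice_toNat NE (by omega) (by omega),
            show ((i : Int) + 1).toNat = i.toNat + 1 by omega,
            show j.toNat - (i.toNat + 1) = (j - (i + 1)).toNat by omega]
        simp [J, List.map_take, List.map_drop]
      have hsr : PySem.Str.join " " ((PySem.List.slice NE (some (j + 1)) none).map (fun x => x.2.2.2))
          = J ((NE.map (fun x => x.2.2.2)).drop (j + 1).toNat) := by
        rw [PySem.List.slice_from NE (by omega)]
        simp [J, List.map_drop]
      have hw : ∀ q : Int, PySem.List.pyGetD (NE.map (fun x => x.2.2.2)) q "" = (PySem.List.pyGetD NE q pvDflt4).2.2.2 :=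
        fun q => PySem.List.pyGetD_map (fun x => x.2.2.2) NE q pvDflt4
      rw [hleft, hsl, hfil, hsr, hsuffj, hw i, hw j]
    case hf =>
      intro j hj1 hj2
      beta_reduce
      have hjW : j.toNat < (NE.map (fun x => x.2.2.2)).length := by simp; omega
      have hwj : PySem.List.pyGetD (NE.map (fun x => x.2.2.2)) j "" = (NE.map (fun x => x.2.2.2))[j.toNat] := by
        rw [PySem.List.pyGetD_eq_getElem _ _ (by omega) (by simp only [List.length_map]; omega)]
      have hq : ((j + 1) - (i + 1)).toNat = (j - (i + 1)).toNat + 1 := by omega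
      rw [hwj, hq, List.take_add_one, List.getElem?_drop,
          show i.toNat + 1 + (j - (i + 1)).toNat = j.toNat by omega,
          List.getElem?_eq_getElem hjW, Option.toList_some, J_append]
      by_cases hji : j = i + 1
      · subst hji
        simp only [beq_self_eq_true, if_true]
        rw [if_pos (by rw [show ((i + 1) - (i + 1) : Int).toNat = 0 by omega, List.take_zero])]
      · have hb : (j == i + 1) = false := by simp [hji]
        rw [hb]
        simp only [Bool.false_eq_true, if_false]
        rw [if_neg (by
          rw [List.take_eq_nil_iff]
          push Not
          refine ⟨by omega, ?_⟩
          intro h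
          rw [List.drop_eq_nil_iff] at h
          omega)]

-- ===== VERDICT (by name: the statement is the Claim_ definition above) =====
theorem group_every_pair_of_NE_in_order_spec : Claim_equal_group_every_pair_of_NE_in_order := by
  intro NE _
  exact ports_eq NE
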